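-- pv_equiv track=rewrite | github.com/aarshvir/jyotish-ai | ephemeris-service/main.py | build_functional_lord_groups
-- ===== SOURCE A (Python) =====
-- from typing import Optional, List, Dict, Any
--
-- SIGN_LORD = [
--     "Mars", "Venus", "Mercury", "Moon", "Sun", "Mercury",
--     "Venus", "Mars", "Jupiter", "Saturn", "Saturn", "Jupiter",
-- ]
--
-- SEVEN_GRAHAS = ("Sun", "Moon", "Mars", "Mercury", "Jupiter", "Venus", "Saturn")
--
-- def get_house_lord(lagna_index: int, house_number: int) -> str:
--     """Lord of ``house_number`` (1–12) for ``lagna_index`` (0–11)."""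
--     sign_index = (lagna_index + house_number - 1) % 12
--     return SIGN_LORD[sign_index]
--
-- def get_badhaka_lord(lagna_index: int) -> str:
--     """Badhaka lord: 11th for movable, 9th for fixed, 7th for dual lagna."""
--     MOVABLE = {0, 3, 6, 9}
--     FIXED = {1, 4, 7, 10}
--     if lagna_index in MOVABLE:
--         badhaka_house = 11
--     elif lagna_index in FIXED:
--         badhaka_house = 9
--     else:
--         badhaka_house = 7
--     return get_house_lord(lagna_index, badhaka_house)
--
-- def _houses_ruled_by_planet(lagna_index: int, planet: str) -> List[int]:
--     return [h for h in range(1, 13) if get_house_lord(lagna_index, h) == planet]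
--
-- def classify_functional_nature(lagna_index: int) -> Dict[str, str]:
--     """
--     Per-lagna functional nature for the seven grahas.
--     Returns planet -> benefic | malefic | neutral | badhaka
--     """
--     lagna_index = lagna_index % 12
--     badhaka_lord = get_badhaka_lord(lagna_index)
--     result: Dict[str, str] = {}
--
--     for planet in SEVEN_GRAHAS:
--         houses = _houses_ruled_by_planet(lagna_index, planet)
--         if planet == badhaka_lord:
--             result[planet] = "badhaka"
--         elif any(h in {1, 5, 9} for h in houses):
--             result[planet] = "benefic"
--         elif any(h in {6, 8, 12} for h in houses) and not any(h in {1, 5, 9} for h in houses):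
--             result[planet] = "malefic"
--         elif any(h in {4, 7, 10} for h in houses):
--             result[planet] = "neutral"
--         else:
--             result[planet] = "neutral"
--
--     return result
--
-- def build_functional_lord_groups(lagna_index: int) -> Dict[str, List[str]]:
--     """UI-ready strings: planet with houses ruled (whole-sign)."""
--     lagna_index = lagna_index % 12
--     nature = classify_functional_nature(lagna_index)
--     groups: Dict[str, List[str]] = {
--         "benefics": [],
--         "malefics": [],
--         "neutral": [],
--         "badhaka": [],
--     }
--     label_for = {
--         "benefic": "benefics",
--         "malefic": "malefics",
--         "neutral": "neutral",
--         "badhaka": "badhaka",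
--     }
--     for planet in SEVEN_GRAHAS:
--         houses = sorted(_houses_ruled_by_planet(lagna_index, planet))
--         if not houses:
--             continue
--         hh = ", ".join(f"H{h}" for h in houses)
--         line = f"{planet} — {hh}"
--         key = label_for[nature[planet]]
--         groups[key].append(line)
--     return groups
-- ===== SOURCE B (Python) =====
-- SIGN_LORD = [
--     "Mars", "Venus", "Mercury", "Moon", "Sun", "Mercury",
--     "Venus", "Mars", "Jupiter", "Saturn", "Saturn", "Jupiter",
-- ]
--
-- SEVEN_GRAHAS = ("Sun", "Moon", "Mars", "Mercury", "Jupiter", "Venus", "Saturn")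
--
-- def build_functional_lord_groups(lagna_index: int):
--     li = lagna_index % 12
--     # one pass over houses: planet -> ruled houses (appended in ascending order)
--     ruled = {}
--     for h in range(1, 13):
--         ruled.setdefault(SIGN_LORD[(li + h - 1) % 12], []).append(h)
--     badhaka_house = 11 if li % 3 == 0 else 9 if li % 3 == 1 else 7
--     badhaka_lord = SIGN_LORD[(li + badhaka_house - 1) % 12]
--     groups = {"benefics": [], "malefics": [], "neutral": [], "badhaka": []}
--     for planet in SEVEN_GRAHAS:
--         houses = ruled.get(planet, [])
--         if not houses:
--             continue
--         if planet == badhaka_lord: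
--             key = "badhaka"
--         elif {1, 5, 9} & set(houses):
--             key = "benefics"
--         elif {6, 8, 12} & set(houses):
--             key = "malefics"
--         else:
--             key = "neutral"
--         groups[key].append(planet + " \u2014 " + ", ".join("H%d" % h for h in houses))
--     return groups
-- ===== Notes on version B (the rewrite author's own statement) =====
-- stated objective: alternative
-- what changed: B makes one pass over houses 1..12 building a planet->ruled-houses table (replacing A's per-planet scans of all 12 houses for both classification and formatting), computes the badhaka house by a modulo-three rule on the lagna instead of two set-membership tests, and classifies each graha directly by set intersection while formatting, with no intermediate nature dict or label map.
import Mathlib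
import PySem

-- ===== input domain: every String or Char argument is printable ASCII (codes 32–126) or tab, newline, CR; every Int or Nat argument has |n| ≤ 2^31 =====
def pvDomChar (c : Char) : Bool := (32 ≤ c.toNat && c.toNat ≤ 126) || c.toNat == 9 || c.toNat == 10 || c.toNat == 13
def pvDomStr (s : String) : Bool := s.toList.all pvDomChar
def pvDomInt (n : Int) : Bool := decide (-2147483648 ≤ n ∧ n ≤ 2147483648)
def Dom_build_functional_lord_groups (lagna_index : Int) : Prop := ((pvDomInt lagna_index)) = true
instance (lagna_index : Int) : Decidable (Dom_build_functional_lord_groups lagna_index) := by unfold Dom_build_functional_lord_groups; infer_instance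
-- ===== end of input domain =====

-- B replaces A's seven per-planet scans of all 12 houses by one pass over the houses that
-- builds a planet -> ruled-houses table, plus a direct li % 3 badhaka rule (objective: alternative).

-- ===== PORT A =====
def pvSignLord : List String :=
  ["Mars", "Venus", "Mercury", "Moon", "Sun", "Mercury",
   "Venus", "Mars", "Jupiter", "Saturn", "Saturn", "Jupiter"]

def pvSevenGrahas : List String :=
  ["Sun", "Moon", "Mars", "Mercury", "Jupiter", "Venus", "Saturn"]

-- get_house_lord: index is always in range (mod 12 of a positive divisor), so getD "" is never the default
def pvGetHouseLord (lagna_index house_number : Int) : String :=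
  (PySem.List.pyGet? pvSignLord (PySem.Int.mod (lagna_index + house_number - 1) 12)).getD ""

def pvGetBadhakaLord (lagna_index : Int) : String :=
  let badhaka_house : Int :=
    if ([0, 3, 6, 9] : List Int).contains lagna_index then 11
    else if ([1, 4, 7, 10] : List Int).contains lagna_index then 9
    else 7
  pvGetHouseLord lagna_index badhaka_house

def pvHousesRuledByPlanet (lagna_index : Int) (planet : String) : List Int :=
  (PySem.List.pyRange 1 13 1).filter (fun h => pvGetHouseLord lagna_index h == planet)

def pvClassifyFunctionalNature (lagna_index : Int) : PySem.Dict String String :=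
  let li := PySem.Int.mod lagna_index 12
  let badhaka_lord := pvGetBadhakaLord li
  pvSevenGrahas.foldl (fun result planet =>
    let houses := pvHousesRuledByPlanet li planet
    if planet == badhaka_lord then result.insert planet "badhaka"
    else if houses.any (fun h => ([1, 5, 9] : List Int).contains h) then result.insert planet "benefic"
    else if houses.any (fun h => ([6, 8, 12] : List Int).contains h)
            && !(houses.any (fun h => ([1, 5, 9] : List Int).contains h)) then result.insert planet "malefic"
    else if houses.any (fun h => ([4, 7, 10] : List Int).contains h) then result.insert planet "neutral"
    else result.insert planet "neutral") PySem.Dict.empty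

-- body of A after the `lagna_index = lagna_index % 12` reassignment
def pvBuildBodyA (li : Int) : List (String × List String) :=
  let nature := pvClassifyFunctionalNature li
  let groups : PySem.Dict String (List String) :=
    PySem.Dict.ofList [("benefics", []), ("malefics", []), ("neutral", []), ("badhaka", [])]
  let label_for : PySem.Dict String String :=
    PySem.Dict.ofList [("benefic", "benefics"), ("malefic", "malefics"),
                       ("neutral", "neutral"), ("badhaka", "badhaka")]
  let groups := pvSevenGrahas.foldl (fun groups planet =>
    let houses := PySem.List.sorted (pvHousesRuledByPlanet li planet) (fun x => x) false
    if houses.isEmpty then groups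
    else
      let hh := PySem.Str.join ", " (houses.map (fun h => PySem.Str.join "" ["H", PySem.Int.toStr h]))
      let line := PySem.Str.join "" [planet, " — ", hh]
      let key := label_for.getD (nature.getD planet "") ""
      groups.modify key [] (fun l => l ++ [line])) groups
  groups.items

def build_functional_lord_groups (lagna_index : Int) : List (String × List String) :=
  pvBuildBodyA (PySem.Int.mod lagna_index 12)

-- ===== PORT B =====
-- body of B after `li = lagna_index % 12`
def pvBuildBodyB (li : Int) : List (String × List String) :=
  let ruled : PySem.Dict String (List Int) :=
    (PySem.List.pyRange 1 13 1).foldl (fun d h =>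
      let lord := (PySem.List.pyGet? pvSignLord (PySem.Int.mod (li + h - 1) 12)).getD ""
      d.insert lord ((d.getD lord []) ++ [h])) PySem.Dict.empty
  let badhaka_house : Int :=
    if PySem.Int.mod li 3 == 0 then 11 else if PySem.Int.mod li 3 == 1 then 9 else 7
  let badhaka_lord := (PySem.List.pyGet? pvSignLord (PySem.Int.mod (li + badhaka_house - 1) 12)).getD ""
  let groups : PySem.Dict String (List String) :=
    PySem.Dict.ofList [("benefics", []), ("malefics", []), ("neutral", []), ("badhaka", [])]
  let groups := pvSevenGrahas.foldl (fun groups planet =>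
    let houses := ruled.getD planet []
    if houses.isEmpty then groups
    else
      let key :=
        if planet == badhaka_lord then "badhaka"
        else if !(PySem.Set.inter ([1, 5, 9] : List Int) (PySem.Set.ofList houses)).isEmpty then "benefics"
        else if !(PySem.Set.inter ([6, 8, 12] : List Int) (PySem.Set.ofList houses)).isEmpty then "malefics"
        else "neutral"
      let line := PySem.Str.join ""
        [planet, " — ", PySem.Str.join ", " (houses.map (fun h => PySem.Str.join "" ["H", PySem.Int.toStr h]))]
      groups.modify key [] (fun l => l ++ [line])) groups
  groups.items

def build_functional_lord_groups_alt (lagna_index : Int) : List (String × List String) :=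
  pvBuildBodyB (PySem.Int.mod lagna_index 12)

-- ===== PRECONDITION & SPEC =====
def Spec_build_functional_lord_groups (lagna_index : Int) (out : List (String × List String)) : Prop := out = build_functional_lord_groups_alt lagna_index
instance (lagna_index : Int) (out : List (String × List String)) : Decidable (Spec_build_functional_lord_groups lagna_index out) := by unfold Spec_build_functional_lord_groups; infer_instance

-- ===== CLAIM (what is proved, stated in full; the proofs are below) =====
def Claim_equal_build_functional_lord_groups : Prop := ∀ (lagna_index : Int), Dom_build_functional_lord_groups lagna_index → Spec_build_functional_lord_groups lagna_index (build_functional_lord_groups lagna_index)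

-- ===== LEMMAS AND PROOFS =====
theorem pvBody_eq (m : Int) (h0 : 0 ≤ m) (h12 : m < 12) : pvBuildBodyA m = pvBuildBodyB m := by
  interval_cases m <;> decide

-- ===== VERDICT (by name: the statement is the Claim_ definition above) =====
theorem build_functional_lord_groups_spec : Claim_equal_build_functional_lord_groups := by
  intro L _
  show build_functional_lord_groups L = build_functional_lord_groups_alt L
  unfold build_functional_lord_groups build_functional_lord_groups_alt
  have hmod : PySem.Int.mod L 12 = L % 12 := PySem.Int.mod_eq_emod_of_pos (by norm_num)
  exact hmod ▸ pvBody_eq _ (Int.emod_nonneg L (by norm_num)) (Int.emod_lt_of_pos L (by norm_num))
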